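-- pv_equiv track=rewrite | github.com/Fengylin/my_python | color_WB/Colour_to_WB.py | ez_map
-- ===== SOURCE A (Python) =====
-- def ez_map(thresold):
--     res=[]
--     for i in range(256):
--         if i<thresold:
--             res.append(1)
--         else:
--             res.append(0)
--     return res
-- ===== SOURCE B (Python) =====
-- def ez_map(thresold):
--     n = max(0, min(256, thresold))
--     return [1] * n + [0] * (256 - n)
-- ===== Notes on version B (the rewrite author's own statement) =====
-- stated objective: simpler
-- what changed: Replaced the per-index compare-and-append loop with a clamped count n and closed-form list construction of n ones followed by zeros.
import Mathlib
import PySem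

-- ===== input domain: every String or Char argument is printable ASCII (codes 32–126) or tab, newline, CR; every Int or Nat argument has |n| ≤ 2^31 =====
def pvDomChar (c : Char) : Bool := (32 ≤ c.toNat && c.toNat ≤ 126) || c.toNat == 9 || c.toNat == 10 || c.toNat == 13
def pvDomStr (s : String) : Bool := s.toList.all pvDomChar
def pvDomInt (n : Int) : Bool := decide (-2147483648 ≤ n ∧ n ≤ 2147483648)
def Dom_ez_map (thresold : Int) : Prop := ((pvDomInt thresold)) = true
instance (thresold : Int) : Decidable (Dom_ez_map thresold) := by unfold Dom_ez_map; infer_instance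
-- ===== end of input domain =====

-- B replaces the per-index compare-and-append loop with a clamped count and closed-form list construction (simpler).

-- ===== PORT A =====
-- literal port: for i in range(256): append 1 if i < thresold else 0
def ez_map (thresold : Int) : List Int :=
  (PySem.List.pyRange 0 256 1).foldl
    (fun res i => if i < thresold then res ++ [1] else res ++ [0]) []

-- ===== PORT B =====
-- literal port of Source B: n = max(0, min(256, thresold)); [1]*n + [0]*(256-n)
def ez_map_alt (thresold : Int) : List Int :=
  let n : Int := max 0 (min 256 thresold)
  List.replicate n.toNat 1 ++ List.replicate (256 - n).toNat 0

-- ===== PRECONDITION & SPEC =====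
def Spec_ez_map (thresold : Int) (out : List Int) : Prop := out = ez_map_alt thresold
instance (thresold : Int) (out : List Int) : Decidable (Spec_ez_map thresold out) := by unfold Spec_ez_map; infer_instance

-- ===== CLAIM (what is proved, stated in full; the proofs are below) =====
def Claim_equal_ez_map : Prop := ∀ (thresold : Int), Dom_ez_map thresold → Spec_ez_map thresold (ez_map thresold)

-- ===== LEMMAS AND PROOFS =====

theorem ez_map_loop (t : Int) (N : Nat) :
    (PySem.List.pyRange 0 N 1).foldl
      (fun res i => if i < t then res ++ [1] else res ++ [0]) []
    = List.replicate (min (max 0 t).toNat N) (1 : Int)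
        ++ List.replicate (N - min (max 0 t).toNat N) (0 : Int) := by
  induction N with
  | zero => simp [PySem.List.pyRange]
  | succ n ih =>
    rw [show ((n + 1 : Nat) : Int) = (n : Int) + 1 by push_cast; ring,
        PySem.List.pyRange_one_succ_right (by omega), List.foldl_append, ih]
    simp only [List.foldl]
    by_cases h : (n : Int) < t
    · have h1 : min (max 0 t).toNat (n + 1) = n + 1 := by omega
      have h2 : min (max 0 t).toNat n = n := by omega
      rw [h1, h2]
      simp [List.replicate_succ', if_pos h]
    · have h1 : min (max 0 t).toNat (n + 1) = min (max 0 t).toNat n := by omega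
      have h2 : (n + 1) - min (max 0 t).toNat n = (n - min (max 0 t).toNat n) + 1 := by omega
      rw [h1, h2]
      simp [List.replicate_succ', if_neg h]

-- ===== VERDICT (by name: the statement is the Claim_ definition above) =====
set_option maxRecDepth 100000 in
theorem ez_map_spec : Claim_equal_ez_map := by
  intro t _
  show ez_map t = ez_map_alt t
  unfold ez_map ez_map_alt
  refine (ez_map_loop t 256).trans ?_
  show _ = List.replicate (max 0 (min 256 t)).toNat 1
        ++ List.replicate ((256 : Int) - max 0 (min 256 t)).toNat 0
  congr 1
  · congr 1; omega
  · congr 1; omega
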